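-- pv_equiv track=rewrite | github.com/kaluginpeter/Algorithms_and_structures_tasks | Python_Solutions/CodeWars/6kyu/Smallest_Permutation.py | min_permutation
-- ===== SOURCE A (Python) =====
-- def min_permutation(n):
--     if n == 0: return n
--     flag, count = True if n < 0 else False, 0
--     out = ''.join(sorted(str(n)))
--     if not flag:
--         while out.startswith('0'):
--             out = out[1:]
--             count += 1
--         out = int(out[0] + '0' * count + out[1:])
--     if flag:
--         out = out[1:]
--         while out.startswith('0'):
--             out = out[1:]
--             count += 1
--         out = int('-' + out[0] + '0' * count + out[1:])
--     return out
-- ===== SOURCE B (Python) =====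
-- def min_permutation(n):
--     if n == 0:
--         return 0
--     counts = [0] * 10
--     for ch in str(abs(n)):
--         counts[ord(ch) - 48] += 1
--     lead = next(d for d in range(1, 10) if counts[d] != 0)
--     counts[lead] -= 1
--     body = chr(48 + lead) + ''.join(chr(48 + d) * counts[d] for d in range(10))
--     return int('-' + body) if n < 0 else int(body)
-- ===== Notes on version B (the rewrite author's own statement) =====
-- stated objective: alternative
-- what changed: A comparison-sorts the characters of str(n) ('-' included) and then loops to move leading zeros behind the first digit; B splits off the sign, builds a length-10 digit-frequency table in one pass (counting sort), picks the smallest nonzero digit as the leading digit and emits the rest from the table.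
import Mathlib
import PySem

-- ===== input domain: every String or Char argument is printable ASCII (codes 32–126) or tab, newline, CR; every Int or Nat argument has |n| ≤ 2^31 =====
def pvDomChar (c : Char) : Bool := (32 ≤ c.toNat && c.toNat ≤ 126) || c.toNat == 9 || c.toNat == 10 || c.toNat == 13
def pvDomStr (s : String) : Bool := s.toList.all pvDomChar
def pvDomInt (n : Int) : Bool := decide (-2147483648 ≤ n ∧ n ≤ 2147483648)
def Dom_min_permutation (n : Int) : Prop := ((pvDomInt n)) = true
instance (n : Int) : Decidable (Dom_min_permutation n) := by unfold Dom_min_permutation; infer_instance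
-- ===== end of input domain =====

-- B replaces A's comparison sort + leading-zero patch loop by a length-10 digit-frequency table
-- (counting sort) with the sign split off; equivalence of the return values is proved for all n.

-- ===== PORT A =====
-- the `while out.startswith('0'): out = out[1:]; count += 1` loop of A, on the characters of `out`
def pvStripZeros : List Char → Nat → List Char × Nat
  | [], count => ([], count)
  | c :: t, count => if c = '0' then pvStripZeros t (count + 1) else (c :: t, count)

def min_permutation (n : Int) : Int :=
  if n = 0 then n
  else
    let flag : Bool := decide (n < 0)
    -- out = ''.join(sorted(str(n)))  (kept as its character list)
    let out : List Char := PySem.List.sorted (PySem.Int.toChars n) id false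
    if !flag then
      let r := pvStripZeros out 0
      match r.1 with
      | [] => 0  -- Python raises IndexError on out[0] here; unreachable (n ≠ 0 has a nonzero digit)
      | c :: rest => (PySem.Int.ofChars? (c :: (List.replicate r.2 '0' ++ rest))).getD 0
    else
      let out1 := out.tail  -- out = out[1:]
      let r := pvStripZeros out1 0
      match r.1 with
      | [] => 0  -- Python raises IndexError on out[0] here; unreachable (n ≠ 0 has a nonzero digit)
      | c :: rest => (PySem.Int.ofChars? ('-' :: c :: (List.replicate r.2 '0' ++ rest))).getD 0

-- ===== PORT B =====
def min_permutation_alt (n : Int) : Int :=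
  if n = 0 then 0
  else
    let s : List Char := PySem.Int.toChars (n.natAbs : Int)  -- str(abs(n))
    -- counts[ord(ch) - 48] += 1 over the digit characters
    let counts : List Nat :=
      s.foldl (fun l c => l.set (c.toNat - 48) (l.getD (c.toNat - 48) 0 + 1)) (List.replicate 10 0)
    -- lead = next(d for d in range(1, 10) if counts[d] != 0); default unreachable for n ≠ 0
    let lead : Nat := (((List.range' 1 9).find? (fun d => counts.getD d 0 != 0)).getD 0)
    let counts' := counts.set lead (counts.getD lead 0 - 1)
    -- body = chr(48 + lead) + ''.join(chr(48 + d) * counts[d] for d in range(10))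
    let body : List Char :=
      Char.ofNat (48 + lead) ::
        (List.range 10).flatMap (fun d => List.replicate (counts'.getD d 0) (Char.ofNat (48 + d)))
    if n < 0 then (PySem.Int.ofChars? ('-' :: body)).getD 0
    else (PySem.Int.ofChars? body).getD 0

-- ===== PRECONDITION & SPEC =====
def Spec_min_permutation (n : Int) (out : Int) : Prop := out = min_permutation_alt n
instance (n : Int) (out : Int) : Decidable (Spec_min_permutation n out) := by unfold Spec_min_permutation; infer_instance

-- ===== CLAIM (what is proved, stated in full; the proofs are below) =====
def Claim_equal_min_permutation : Prop := ∀ (n : Int), Dom_min_permutation n → Spec_min_permutation n (min_permutation n)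

-- ===== LEMMAS AND PROOFS =====

def pvDchar (d : Nat) : Char := Char.ofNat (48 + d)
theorem pvDigitChar_eq (d : Nat) (h : d < 10) : Nat.digitChar d = pvDchar d := by
  interval_cases d <;> rfl
theorem pvDchar_toNat (d : Nat) (h : d < 10) : (pvDchar d).toNat = 48 + d := by
  interval_cases d <;> decide
theorem pvDchar_inj (d e : Nat) (hd : d < 10) (he : e < 10) (h : pvDchar d = pvDchar e) : d = e := by
  have := congrArg Char.toNat h
  rw [pvDchar_toNat d hd, pvDchar_toNat e he] at this
  omega
theorem pvChar_le_of_toNat (a b : Char) (h : a.toNat ≤ b.toNat) : a ≤ b := by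
  rw [Char.le_def]; exact UInt32.le_iff_toNat_le.mpr h
theorem pvDchar_le (d e : Nat) (hd : d < 10) (he : e < 10) (h : d ≤ e) : pvDchar d ≤ pvDchar e := by
  apply pvChar_le_of_toNat
  rw [pvDchar_toNat d hd, pvDchar_toNat e he]
  omega
def pvExp (C : Nat → Nat) (idx : List Nat) : List Char :=
  idx.flatMap (fun d => List.replicate (C d) (pvDchar d))
theorem pvExp_cons (C : Nat → Nat) (d : Nat) (idx : List Nat) :
    pvExp C (d :: idx) = List.replicate (C d) (pvDchar d) ++ pvExp C idx := rfl
theorem pvExp_mem (C : Nat → Nat) (idx : List Nat) (x : Char) (h : x ∈ pvExp C idx) :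
    ∃ d ∈ idx, x = pvDchar d := by
  simp only [pvExp, List.mem_flatMap] at h
  obtain ⟨d, hd, hx⟩ := h
  exact ⟨d, hd, List.eq_of_mem_replicate hx⟩
theorem pvExp_pairwise (C : Nat → Nat) (idx : List Nat) (h10 : ∀ d ∈ idx, d < 10)
    (hs : idx.Pairwise (· ≤ ·)) : (pvExp C idx).Pairwise (· ≤ ·) := by
  induction idx with
  | nil => exact List.Pairwise.nil
  | cons d idx ih =>
    rw [pvExp_cons, List.pairwise_append]
    refine ⟨List.pairwise_replicate.mpr (Or.inr le_rfl), ih (fun e he => h10 e (List.mem_cons_of_mem _ he)) hs.tail, ?_⟩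
    intro a ha b hb
    obtain rfl := List.eq_of_mem_replicate ha
    obtain ⟨e, he, rfl⟩ := pvExp_mem C idx b hb
    exact pvDchar_le d e (h10 d List.mem_cons_self) (h10 e (List.mem_cons_of_mem _ he))
      (List.rel_of_pairwise_cons hs he)
theorem pvExp_count (C : Nat → Nat) (idx : List Nat) (x : Char) :
    (pvExp C idx).count x = ((idx.filter (fun d => x == pvDchar d)).map C).sum := by
  induction idx with
  | nil => rfl
  | cons d idx ih =>
    rw [pvExp_cons]
    simp only [List.count_append, List.filter_cons]
    by_cases h : x = pvDchar d
    · subst h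
      simp [List.count_replicate, ih]
    · have h1 : (pvDchar d == x) = false := by simp; exact fun he => h he.symm
      have h2 : (x == pvDchar d) = false := by simp; exact h
      simp [List.count_replicate, h1, h2, ih]

theorem pvSorted_eq_exp (ds : List Char) (hd : ∀ c ∈ ds, 48 ≤ c.toNat ∧ c.toNat < 58) :
    PySem.List.sorted ds id false = pvExp (fun d => ds.count (pvDchar d)) (List.range 10) := by
  have hperm : ds.Perm (pvExp (fun d => ds.count (pvDchar d)) (List.range 10)) := by
    rw [List.perm_iff_count]
    intro x
    rw [pvExp_count]
    by_cases hx : 48 ≤ x.toNat ∧ x.toNat < 58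
    · have hx10 : x.toNat - 48 < 10 := by omega
      have hxd : x = pvDchar (x.toNat - 48) := by
        unfold pvDchar
        have h : 48 + (x.toNat - 48) = x.toNat := by omega
        rw [h, Char.ofNat_toNat]
      rw [hxd]
      have hfil : ∀ d0, d0 < 10 →
          (List.range 10).filter (fun d => pvDchar d0 == pvDchar d) = [d0] := by
        intro d0 hd0
        interval_cases d0 <;> decide
      rw [hfil _ hx10]
      simp
    · have hfil : (List.range 10).filter (fun d => x == pvDchar d) = [] := by
        rw [List.filter_eq_nil_iff]
        intro d hdm
        have hd10 : d < 10 := List.mem_range.mp hdm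
        simp only [beq_iff_eq]
        intro heq
        exact hx ⟨by rw [heq, pvDchar_toNat d hd10]; omega,
                  by rw [heq, pvDchar_toNat d hd10]; omega⟩
      rw [hfil]
      have : x ∉ ds := fun hmem => hx (hd x hmem)
      simp [List.count_eq_zero_of_not_mem this]
  apply List.Perm.eq_of_pairwise (le := (· ≤ ·))
  · intro a b _ _ h1 h2; exact le_antisymm h1 h2
  · exact PySem.List.sorted_pairwise ds id
  · exact pvExp_pairwise _ _ (fun d hdm => List.mem_range.mp hdm) (List.pairwise_le_range)
  · exact (PySem.List.sorted_perm ds id false).trans hperm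

theorem pvSorted_neg (ds : List Char) (hd : ∀ c ∈ ds, 48 ≤ c.toNat ∧ c.toNat < 58) :
    PySem.List.sorted ('-' :: ds) id false = '-' :: PySem.List.sorted ds id false := by
  apply List.Perm.eq_of_pairwise (le := (· ≤ ·))
  · intro a b _ _ h1 h2; exact le_antisymm h1 h2
  · exact PySem.List.sorted_pairwise _ id
  · rw [List.pairwise_cons]
    refine ⟨?_, PySem.List.sorted_pairwise ds id⟩
    intro b hb
    have hbm : b ∈ ds := (PySem.List.mem_sorted ds id false b).mp hb
    exact pvChar_le_of_toNat _ _ (by have := (hd b hbm).1; simp; omega)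
  · exact (PySem.List.sorted_perm _ id false).trans
      (((PySem.List.sorted_perm ds id false).cons '-').symm)

theorem pvTDC_mem : ∀ (f n : Nat) (ds : List Char) (c : Char),
    c ∈ Nat.toDigitsCore 10 f n ds → c ∈ ds ∨ ∃ d, d < 10 ∧ c = Nat.digitChar d := by
  intro f
  induction f with
  | zero => intro n ds c h; simp only [Nat.toDigitsCore] at h; exact Or.inl h
  | succ f ih =>
    intro n ds c h
    simp only [Nat.toDigitsCore] at h
    by_cases h0 : n / 10 = 0
    · simp only [h0, if_pos] at h
      rcases List.mem_cons.mp h with h | h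
      · exact Or.inr ⟨n % 10, by omega, h⟩
      · exact Or.inl h
    · rw [if_neg h0] at h
      rcases ih _ _ _ h with h' | h'
      · rcases List.mem_cons.mp h' with h'' | h''
        · exact Or.inr ⟨n % 10, by omega, h''⟩
        · exact Or.inl h''
      · exact Or.inr h'
theorem pvToDigits_mem (m : Nat) (c : Char) (h : c ∈ Nat.toDigits 10 m) :
    48 ≤ c.toNat ∧ c.toNat < 58 := by
  rcases pvTDC_mem (m + 1) m [] c h with h' | ⟨d, hd, rfl⟩
  · simp at h'
  · rw [pvDigitChar_eq d hd, pvDchar_toNat d hd]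
    omega
theorem pvTDC_head : ∀ (f n : Nat) (ds : List Char), 0 < n → n < f →
    ∃ d t, 0 < d ∧ d < 10 ∧ Nat.toDigitsCore 10 f n ds = Nat.digitChar d :: t := by
  intro f
  induction f with
  | zero => intro n ds h1 h2; omega
  | succ f ih =>
    intro n ds h1 h2
    by_cases h0 : n / 10 = 0
    · exact ⟨n % 10, ds, by omega, by omega, by simp only [Nat.toDigitsCore, h0, if_pos]⟩
    · obtain ⟨d, t, hd1, hd2, heq⟩ := ih (n / 10) (Nat.digitChar (n % 10) :: ds)
        (Nat.pos_of_ne_zero h0) (by omega)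
      refine ⟨d, t, hd1, hd2, ?_⟩
      simp only [Nat.toDigitsCore, if_neg h0]
      exact heq
theorem pvToDigits_head (m : Nat) (h : 0 < m) :
    ∃ d t, 0 < d ∧ d < 10 ∧ Nat.toDigits 10 m = Nat.digitChar d :: t :=
  pvTDC_head (m + 1) m [] h (Nat.lt_succ_self m)

theorem pvExp_congr (C C' : Nat → Nat) (idx : List Nat) (h : ∀ d ∈ idx, C d = C' d) :
    pvExp C idx = pvExp C' idx := by
  induction idx with
  | nil => rfl
  | cons d idx ih =>
    rw [pvExp_cons, pvExp_cons, h d List.mem_cons_self, ih (fun e he => h e (List.mem_cons_of_mem _ he))]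

theorem pvExp_extract : ∀ (idx : List Nat) (C : Nat → Nat) (L : Nat), idx.Nodup →
    idx.find? (fun d => C d != 0) = some L →
    pvExp C idx = pvDchar L :: pvExp (fun d => if d = L then C d - 1 else C d) idx := by
  intro idx
  induction idx with
  | nil => intro C L _ h; simp at h
  | cons d idx ih =>
    intro C L hnd hf
    rw [List.find?_cons] at hf
    by_cases hCd : (C d != 0) = true
    · rw [hCd] at hf
      injection hf with hL
      subst hL
      have hC : C d ≠ 0 := by simpa using hCd
      rw [pvExp_cons, pvExp_cons]
      have hrep : List.replicate (C d) (pvDchar d) = pvDchar d :: List.replicate (C d - 1) (pvDchar d) := by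
        conv_lhs => rw [show C d = (C d - 1) + 1 by omega]
        rfl
      rw [hrep]
      have hnotmem : d ∉ idx := (List.nodup_cons.mp hnd).1
      have : pvExp C idx = pvExp (fun e => if e = d then C e - 1 else C e) idx := by
        apply pvExp_congr
        intro e he
        have : e ≠ d := fun h => hnotmem (h ▸ he)
        simp [this]
      rw [this]
      simp
    · rw [Bool.not_eq_true] at hCd
      rw [hCd] at hf
      have hC : C d = 0 := by simpa using hCd
      have hnotmem : d ∉ idx := (List.nodup_cons.mp hnd).1
      have hLmem : L ∈ idx := List.mem_of_find?_eq_some hf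
      have hdL : d ≠ L := fun h => hnotmem (h ▸ hLmem)
      rw [pvExp_cons, pvExp_cons, ih C L (List.nodup_cons.mp hnd).2 hf]
      simp [hC, hdL]

theorem pvStrip_spec : ∀ (z : Nat) (T : List Char) (k : Nat),
    (∀ c t, T = c :: t → c ≠ '0') →
    pvStripZeros (List.replicate z '0' ++ T) k = (T, k + z) := by
  intro z
  induction z with
  | zero =>
    intro T k hT
    cases T with
    | nil => rfl
    | cons c t => simpa [pvStripZeros] using fun h => absurd h (hT c t rfl)
  | succ z ih =>
    intro T k hT
    rw [List.replicate_succ, List.cons_append]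
    show pvStripZeros ('0' :: (List.replicate z '0' ++ T)) k = (T, k + (z + 1))
    rw [show pvStripZeros ('0' :: (List.replicate z '0' ++ T)) k
        = pvStripZeros (List.replicate z '0' ++ T) (k + 1) by simp [pvStripZeros]]
    rw [ih T (k + 1) hT]
    simp [Nat.add_assoc, Nat.add_comm 1 z]

theorem pvChar_recover (c : Char) (h1 : 48 ≤ c.toNat) (h2 : c.toNat < 58) :
    c = pvDchar (c.toNat - 48) := by
  unfold pvDchar
  have h : 48 + (c.toNat - 48) = c.toNat := by omega
  rw [h, Char.ofNat_toNat]

theorem pvFold_counts : ∀ (ds : List Char) (l : List Nat), l.length = 10 →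
    (∀ c ∈ ds, 48 ≤ c.toNat ∧ c.toNat < 58) →
    ∀ d, d < 10 →
      (ds.foldl (fun l c => l.set (c.toNat - 48) (l.getD (c.toNat - 48) 0 + 1)) l).getD d 0
        = l.getD d 0 + ds.count (pvDchar d) := by
  intro ds
  induction ds with
  | nil => intro l _ _ d _; simp
  | cons c ds ih =>
    intro l hl hd d hd10
    have hc := hd c List.mem_cons_self
    have hi : c.toNat - 48 < 10 := by omega
    rw [List.foldl_cons]
    rw [ih (l.set (c.toNat - 48) (l.getD (c.toNat - 48) 0 + 1)) (by simp [hl])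
        (fun e he => hd e (List.mem_cons_of_mem _ he)) d hd10]
    have hcd : c = pvDchar (c.toNat - 48) := pvChar_recover c hc.1 hc.2
    rw [List.count_cons]
    by_cases he : d = c.toNat - 48
    · subst he
      have hset : (l.set (c.toNat - 48) (l.getD (c.toNat - 48) 0 + 1)).getD (c.toNat - 48) 0
          = l.getD (c.toNat - 48) 0 + 1 := by
        rw [List.getD_eq_getElem?_getD, List.getElem?_set_self (by omega)]
        rfl
      have hbeq : (pvDchar (c.toNat - 48) == c) = true := beq_iff_eq.mpr hcd.symm
      rw [hset]
      simp [List.count_cons, ← hcd, List.getD_eq_getElem?_getD]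
      omega
    · have h1 : (l.set (c.toNat - 48) (l.getD (c.toNat - 48) 0 + 1)).getD d 0 = l.getD d 0 := by
        rw [List.getD_eq_getElem?_getD, List.getElem?_set_ne (by omega), ← List.getD_eq_getElem?_getD]
      have h2 : (pvDchar d == c) = false := by
        rw [beq_eq_false_iff_ne]
        intro hcontra
        exact he (pvDchar_inj d (c.toNat - 48) hd10 hi (hcontra.trans hcd))
      rw [h1]
      simp [h2]
      exact fun hcontra => (beq_eq_false_iff_ne.mp h2) hcontra.symm

theorem pvFold_length (ds : List Char) (l : List Nat) :
    (ds.foldl (fun l c => l.set (c.toNat - 48) (l.getD (c.toNat - 48) 0 + 1)) l).length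
      = l.length := by
  induction ds generalizing l with
  | nil => rfl
  | cons c ds ih => rw [List.foldl_cons, ih]; simp

theorem pvFind_congr (l : List Nat) (p q : Nat → Bool) (h : ∀ x ∈ l, p x = q x) :
    l.find? p = l.find? q := by
  induction l with
  | nil => rfl
  | cons a l ih =>
    rw [List.find?_cons, List.find?_cons, h a List.mem_cons_self,
        ih (fun x hx => h x (List.mem_cons_of_mem _ hx))]


def pvCounts (ds : List Char) : List Nat :=
  ds.foldl (fun l c => l.set (c.toNat - 48) (l.getD (c.toNat - 48) 0 + 1)) (List.replicate 10 0)

def pvLead (ds : List Char) : Nat :=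
  ((List.range' 1 9).find? (fun d => (pvCounts ds).getD d 0 != 0)).getD 0

def pvBody (ds : List Char) : List Char :=
  Char.ofNat (48 + pvLead ds) ::
    (List.range 10).flatMap (fun d =>
      List.replicate
        (((pvCounts ds).set (pvLead ds) ((pvCounts ds).getD (pvLead ds) 0 - 1)).getD d 0)
        (Char.ofNat (48 + d)))

-- `min_permutation_alt` written with the proof-side names (definitional unfolding of its lets)
theorem pvAltEq (n : Int) (h : ¬ n = 0) :
    min_permutation_alt n =
      if n < 0 then
        (PySem.Int.ofChars? ('-' :: pvBody (PySem.Int.toChars ((n.natAbs : Nat) : Int)))).getD 0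
      else (PySem.Int.ofChars? (pvBody (PySem.Int.toChars ((n.natAbs : Nat) : Int)))).getD 0 := by
  unfold min_permutation_alt
  rw [if_neg h]
  rfl

theorem pvKey (ds : List Char) (hd : ∀ c ∈ ds, 48 ≤ c.toNat ∧ c.toNat < 58)
    (dh : Nat) (t : List Char) (hdh0 : 0 < dh) (hdh10 : dh < 10)
    (hdsc : ds = Nat.digitChar dh :: t) :
    ∃ c rest k,
      pvStripZeros (PySem.List.sorted ds id false) 0 = (c :: rest, k) ∧
      pvBody ds = c :: (List.replicate k '0' ++ rest) := by
  set C : Nat → Nat := fun d => ds.count (pvDchar d) with hC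
  have hdmem : pvDchar dh ∈ ds := by
    rw [hdsc, ← pvDigitChar_eq dh hdh10]; exact List.mem_cons_self
  have hCdh : C dh ≠ 0 := by
    rw [hC]; simpa [Nat.pos_iff_ne_zero] using List.count_pos_iff.mpr hdmem
  have hclen : (pvCounts ds).length = 10 := by
    rw [pvCounts, pvFold_length]; simp
  have hcget : ∀ d, d < 10 → (pvCounts ds).getD d 0 = C d := by
    intro d hd10
    rw [pvCounts, pvFold_counts ds (List.replicate 10 0) (by simp) hd d hd10,
      show (List.replicate 10 (0 : Nat)).getD d 0 = 0 from by
        rw [List.getD_eq_getElem?_getD, List.getElem?_replicate]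
        simp [hd10]]
    simp [hC]
  have hfc : (List.range' 1 9).find? (fun d => (pvCounts ds).getD d 0 != 0)
      = (List.range' 1 9).find? (fun d => C d != 0) := by
    apply pvFind_congr
    intro x hx
    have hx10 : x < 10 := by have := List.mem_range'_1.mp hx; omega
    rw [hcget x hx10]
  obtain ⟨L, hfind⟩ : ∃ L, (List.range' 1 9).find? (fun d => C d != 0) = some L := by
    rcases hq : (List.range' 1 9).find? (fun d => C d != 0) with _ | L
    · exfalso
      have := List.find?_eq_none.mp hq dh (List.mem_range'_1.mpr ⟨hdh0, by omega⟩)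
      simp [hCdh] at this
    · exact ⟨L, rfl⟩
  have hLmem : 1 ≤ L ∧ L < 10 := by
    have := List.mem_range'_1.mp (List.mem_of_find?_eq_some hfind)
    omega
  have hsorted : PySem.List.sorted ds id false = pvExp C (List.range 10) :=
    pvSorted_eq_exp ds hd
  have hrange : List.range 10 = 0 :: List.range' 1 9 := by decide
  set Cdec : Nat → Nat := fun d => if d = L then C d - 1 else C d with hCdec
  have hext : pvExp C (List.range' 1 9) = pvDchar L :: pvExp Cdec (List.range' 1 9) :=
    pvExp_extract _ C L (List.nodup_range' 1) hfind
  have hchar0 : pvDchar 0 = '0' := by decide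
  have hL0 : pvDchar L ≠ '0' := by
    intro h
    have h' := congrArg Char.toNat h
    rw [pvDchar_toNat L (by omega)] at h'
    have h48 : '0'.toNat = 48 := by decide
    omega
  have hsplit : pvExp C (List.range 10)
      = List.replicate (C 0) '0' ++ (pvDchar L :: pvExp Cdec (List.range' 1 9)) := by
    rw [hrange, pvExp_cons, hchar0, hext]
  have hstrip : pvStripZeros (PySem.List.sorted ds id false) 0
      = (pvDchar L :: pvExp Cdec (List.range' 1 9), C 0) := by
    rw [hsorted, hsplit, pvStrip_spec (C 0) _ 0 ?_]
    · simp
    · intro c t' hct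
      injection hct with h1 _
      rw [← h1]
      exact hL0
  have hlead : pvLead ds = L := by
    rw [pvLead, hfc, hfind]
    rfl
  have hset : ∀ d, d < 10 →
      ((pvCounts ds).set L ((pvCounts ds).getD L 0 - 1)).getD d 0 = Cdec d := by
    intro d hd10
    by_cases hdL : d = L
    · subst hdL
      rw [List.getD_eq_getElem?_getD, List.getElem?_set_self (by omega)]
      rw [hcget d hd10]
      simp [hCdec]
    · rw [List.getD_eq_getElem?_getD, List.getElem?_set_ne (fun h => hdL h.symm),
          ← List.getD_eq_getElem?_getD, hcget d hd10]
      simp [hCdec, hdL]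
  refine ⟨pvDchar L, pvExp Cdec (List.range' 1 9), C 0, hstrip, ?_⟩
  rw [pvBody, hlead]
  have hflat : (List.range 10).flatMap (fun d =>
      List.replicate (((pvCounts ds).set L ((pvCounts ds).getD L 0 - 1)).getD d 0)
        (Char.ofNat (48 + d)))
      = pvExp Cdec (List.range 10) := by
    apply pvExp_congr
    intro d hdm
    exact hset d (List.mem_range.mp hdm)
  rw [hflat, hrange, pvExp_cons, hchar0]
  have hCdec0 : Cdec 0 = C 0 := by simp [hCdec]; omega
  rw [hCdec0]
  rfl

theorem pv_main (n : Int) : min_permutation n = min_permutation_alt n := by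
  by_cases hz : n = 0
  · subst hz; rfl
  · have hmpos : 0 < n.natAbs := Int.natAbs_pos.mpr hz
    obtain ⟨dh, t, hdh0, hdh10, hdsc⟩ := pvToDigits_head n.natAbs hmpos
    have hd : ∀ c ∈ Nat.toDigits 10 n.natAbs, 48 ≤ c.toNat ∧ c.toNat < 58 :=
      fun c hc => pvToDigits_mem n.natAbs c hc
    obtain ⟨c, rest, k, hstrip, hbody⟩ := pvKey (Nat.toDigits 10 n.natAbs) hd dh t hdh0 hdh10 hdsc
    have hsB : PySem.Int.toChars ((n.natAbs : Nat) : Int) = Nat.toDigits 10 n.natAbs := by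
      unfold PySem.Int.toChars
      rw [if_neg (show ¬(((n.natAbs : Nat) : Int) < 0) by omega)]
      congr 1
    rw [pvAltEq n hz, hsB]
    by_cases hneg : n < 0
    · have hsA : PySem.Int.toChars n = '-' :: Nat.toDigits 10 n.natAbs := by
        simp [PySem.Int.toChars, hneg]
      rw [if_pos hneg]
      simp only [min_permutation, if_neg hz, hneg, decide_true, Bool.not_true,
        Bool.false_eq_true, reduceIte, hsA]
      rw [pvSorted_neg _ hd, List.tail_cons, hstrip, hbody]
    · have hsA : PySem.Int.toChars n = Nat.toDigits 10 n.natAbs := by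
        unfold PySem.Int.toChars
        rw [if_neg hneg]
        congr 1
        omega
      rw [if_neg hneg]
      simp only [min_permutation, if_neg hz, hneg, decide_false, Bool.not_false, reduceIte, hsA]
      rw [hstrip, hbody]

-- ===== VERDICT (by name: the statement is the Claim_ definition above) =====
theorem min_permutation_spec : Claim_equal_min_permutation := by
  intro n _
  unfold Spec_min_permutation
  exact pv_main n
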